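-- pv_equiv track=rewrite | github.com/aurora0110/fintech | utils/tmp/run_b2_trend_follow_experiment.py | max_consecutive_failures
-- ===== SOURCE A (Python) =====
-- from typing import Dict, List, Optional
--
-- def max_consecutive_failures(flags: List[bool]) -> int:
--     best = 0
--     cur = 0
--     for flag in flags:
--         if flag:
--             cur = 0
--         else:
--             cur += 1
--             best = max(best, cur)
--     return best
-- ===== SOURCE B (Python) =====
-- from itertools import groupby
-- from typing import List
--
--
-- def max_consecutive_failures(flags: List[bool]) -> int:
--     return max((sum(1 for _ in g) for k, g in groupby(flags, key=bool) if not k),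
--                default=0)
-- ===== Notes on version B (the rewrite author's own statement) =====
-- stated objective: idiomatic
-- what changed: Replaced the running best/cur counter loop with itertools.groupby(key=bool): split flags into maximal runs of equal truthiness and take the max length over the falsy runs (default 0).
import Mathlib
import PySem

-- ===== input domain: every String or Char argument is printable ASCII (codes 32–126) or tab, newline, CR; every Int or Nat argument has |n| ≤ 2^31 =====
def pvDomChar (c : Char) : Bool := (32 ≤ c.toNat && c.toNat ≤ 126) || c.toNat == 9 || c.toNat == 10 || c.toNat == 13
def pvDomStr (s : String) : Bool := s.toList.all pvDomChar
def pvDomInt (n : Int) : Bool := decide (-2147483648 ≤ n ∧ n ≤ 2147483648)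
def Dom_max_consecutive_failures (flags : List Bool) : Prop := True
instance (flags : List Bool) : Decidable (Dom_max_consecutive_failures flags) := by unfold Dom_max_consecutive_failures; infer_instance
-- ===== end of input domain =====

-- B replaces A's running best/cur counter loop with a groupby decomposition:
-- split flags into maximal runs and take the max length over the falsy runs (idiomatic, same O(n) cost).

-- ===== PORT A =====
def max_consecutive_failures (flags : List Bool) : Int :=
  let st := flags.foldl
    (fun (s : Int × Int) flag =>
      if flag then (s.1, 0) else (max s.1 (s.2 + 1), s.2 + 1))
    (0, 0)
  st.1

-- ===== PORT B =====
-- itertools.groupby ported by hand: each maximal run of equal elements becomes (key, run length)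
def pvRuns : List Bool → List (Bool × Int)
  | [] => []
  | b :: rest =>
    (b, 1 + ((rest.takeWhile (· == b)).length : Int)) ::
      pvRuns (rest.dropWhile (· == b))
termination_by l => l.length
decreasing_by
  simp only [List.length_cons]
  have := List.length_dropWhile_le (· == b) rest
  omega

-- max(... for k, g in groupby(...) if not k, default=0)
def max_consecutive_failures_alt (flags : List Bool) : Int :=
  ((pvRuns flags).filterMap (fun g => if g.1 then none else some g.2)).foldl max 0

-- ===== PRECONDITION & SPEC =====
def Spec_max_consecutive_failures (flags : List Bool) (out : Int) : Prop := out = max_consecutive_failures_alt flags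
instance (flags : List Bool) (out : Int) : Decidable (Spec_max_consecutive_failures flags out) := by unfold Spec_max_consecutive_failures; infer_instance

-- ===== CLAIM (what is proved, stated in full; the proofs are below) =====
def Claim_equal_max_consecutive_failures : Prop := ∀ (flags : List Bool), Dom_max_consecutive_failures flags → Spec_max_consecutive_failures flags (max_consecutive_failures flags)

-- ===== LEMMAS AND PROOFS =====

-- length of the leading run of `false`s
def leadN : List Bool → Nat
  | [] => 0
  | true :: _ => 0
  | false :: r => leadN r + 1

-- max length of a run of `false`s (the common specification both ports meet)
def ansN : List Bool → Nat
  | [] => 0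
  | true :: r => ansN r
  | false :: r => max (leadN r + 1) (ansN r)

theorem lead_le_ans : ∀ l : List Bool, leadN l ≤ ansN l := by
  intro l
  induction l with
  | nil => simp [leadN, ansN]
  | cons b r ih => cases b <;> simp [leadN, ansN]

theorem ans_true_prefix : ∀ (l t : List Bool), (∀ x ∈ l, x = true) →
    ansN (l ++ t) = ansN t := by
  intro l
  induction l with
  | nil => intro t _; rfl
  | cons b r ih =>
    intro t h
    have hb : b = true := h b (by simp)
    subst hb
    simpa [ansN] using ih t (fun x hx => h x (by simp [hx]))

theorem ans_false_prefix : ∀ (l t : List Bool), (∀ x ∈ l, x = false) →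
    ansN (l ++ t) = max (leadN (l ++ t)) (ansN t) ∧
      leadN (l ++ t) = l.length + leadN t := by
  intro l
  induction l with
  | nil =>
    intro t _
    have := lead_le_ans t
    simp only [List.nil_append, List.length_nil]
    omega
  | cons b r ih =>
    intro t h
    have hb : b = false := h b (by simp)
    subst hb
    obtain ⟨h1, h2⟩ := ih t (fun x hx => h x (by simp [hx]))
    simp only [List.cons_append, ansN, leadN, List.length_cons]
    omega

theorem foldl_max_shift : ∀ (l : List Int) (a b : Int),
    l.foldl max (max a b) = max b (l.foldl max a) := by
  intro l
  induction l with
  | nil => intro a b; simp only [List.foldl]; omega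
  | cons x l ih =>
    intro a b
    simp only [List.foldl]
    rw [show max (max a b) x = max (max a x) b by omega, ih]

-- A's loop invariant
theorem loopA_char : ∀ (l : List Bool) (best cur : Int), 0 ≤ cur → cur ≤ best →
    (l.foldl (fun (s : Int × Int) flag =>
        if flag then (s.1, 0) else (max s.1 (s.2 + 1), s.2 + 1)) (best, cur)).1
      = max best (max (cur + (leadN l : Int)) (ansN l)) := by
  intro l
  induction l with
  | nil =>
    intro best cur h0 h1
    simp [List.foldl, leadN, ansN]
    omega
  | cons b r ih =>
    intro best cur h0 h1
    cases b with
    | true =>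
      have := lead_le_ans r
      simp only [List.foldl, reduceIte]
      rw [ih best 0 le_rfl (by omega)]
      simp only [leadN, ansN]
      push_cast
      omega
    | false =>
      have := lead_le_ans r
      simp only [List.foldl]
      rw [if_neg Bool.false_ne_true, ih (max best (cur + 1)) (cur + 1) (by omega) (by omega)]
      simp only [leadN, ansN]
      push_cast
      omega

theorem A_eq_ans (flags : List Bool) : max_consecutive_failures flags = (ansN flags : Int) := by
  unfold max_consecutive_failures
  have := lead_le_ans flags
  rw [loopA_char flags 0 0 le_rfl le_rfl]
  omega

theorem B_eq_ans (flags : List Bool) : max_consecutive_failures_alt flags = (ansN flags : Int) := by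
  unfold max_consecutive_failures_alt
  induction flags using pvRuns.induct with
  | case1 => simp [pvRuns, ansN]
  | case2 b rest ih =>
    have hsplit := List.takeWhile_append_dropWhile (p := (· == b)) (l := rest)
    cases b with
    | true =>
      rw [pvRuns]
      simp only [List.filterMap_cons, reduceIte]
      rw [ih]
      have htw : ∀ x ∈ rest.takeWhile (· == true), x = true := by
        intro x hx
        simpa using List.mem_takeWhile_imp hx
      have : ansN (true :: rest) = ansN (rest.dropWhile (· == true)) := by
        have h := ans_true_prefix (rest.takeWhile (· == true)) (rest.dropWhile (· == true)) htw
        rw [hsplit] at h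
        exact h
      rw [this]
    | false =>
      rw [pvRuns]
      simp only [List.filterMap_cons]
      rw [if_neg Bool.false_ne_true]
      simp only [List.foldl_cons]
      rw [foldl_max_shift, ih]
      have htw : ∀ x ∈ rest.takeWhile (· == false), x = false := by
        intro x hx
        simpa using List.mem_takeWhile_imp hx
      have hdw : leadN (rest.dropWhile (· == false)) = 0 := by
        cases hd : rest.dropWhile (· == false) with
        | nil => simp [leadN]
        | cons y ys =>
          have : ¬ (y == false) = true := by
            have := List.head?_dropWhile_not (· == false) rest
            rw [hd] at this
            simpa using this
          have hy : y = true := by cases y <;> simp_all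
          subst hy; simp [leadN]
      obtain ⟨h1, h2⟩ := ans_false_prefix (rest.takeWhile (· == false))
        (rest.dropWhile (· == false)) htw
      have hans : ansN (false :: rest)
          = max ((rest.takeWhile (· == false)).length + 1)
              (ansN (rest.dropWhile (· == false))) := by
        rw [hsplit] at h1 h2
        rw [show ansN (false :: rest) = max (leadN rest + 1) (ansN rest) from rfl]
        omega
      rw [hans]
      push_cast
      omega

-- ===== VERDICT (by name: the statement is the Claim_ definition above) =====
theorem max_consecutive_failures_spec : Claim_equal_max_consecutive_failures := by
  intro flags _
  unfold Spec_max_consecutive_failures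
  rw [A_eq_ans, B_eq_ans]
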